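-- pv_equiv track=rewrite | github.com/Rudra2018/ARTEMIS | security_engines/advanced_compliance_engine.py | _estimate_total_remediation_effort
-- ===== SOURCE A (Python) =====
-- from typing import Dict, List, Any, Optional, Tuple, Set
--
-- def _estimate_total_remediation_effort(violations: List[Dict[str, Any]]) -> str:
--     """Estimate total effort required for remediation"""
--
--     critical_count = len([v for v in violations if v.get("severity") == "critical"])
--     high_count = len([v for v in violations if v.get("severity") == "high"])
--     medium_count = len([v for v in violations if v.get("severity") == "medium"])
--
--     # Effort calculation based on violation severity
--     total_effort_points = critical_count * 8 + high_count * 5 + medium_count * 2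
--
--     if total_effort_points >= 40:
--         return "very_high (6+ months)"
--     elif total_effort_points >= 25:
--         return "high (3-6 months)"
--     elif total_effort_points >= 15:
--         return "medium (1-3 months)"
--     else:
--         return "low (2-4 weeks)"
-- ===== SOURCE B (Python) =====
-- def _estimate_total_remediation_effort(violations):
--     """Estimate total effort required for remediation (single-pass weighted sum)."""
--     weights = {"critical": 8, "high": 5, "medium": 2}
--     total = 0
--     for v in violations:
--         total += weights.get(v.get("severity"), 0)
--     if total >= 40:
--         return "very_high (6+ months)"
--     elif total >= 25:
--         return "high (3-6 months)"
--     elif total >= 15: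
--         return "medium (1-3 months)"
--     else:
--         return "low (2-4 weeks)"
-- ===== Notes on version B (the rewrite author's own statement) =====
-- stated objective: simpler
-- what changed: Replaces the three filtering list comprehensions (three passes over violations) with one pass that accumulates effort points via a severity-to-weight dictionary lookup.
import Mathlib
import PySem

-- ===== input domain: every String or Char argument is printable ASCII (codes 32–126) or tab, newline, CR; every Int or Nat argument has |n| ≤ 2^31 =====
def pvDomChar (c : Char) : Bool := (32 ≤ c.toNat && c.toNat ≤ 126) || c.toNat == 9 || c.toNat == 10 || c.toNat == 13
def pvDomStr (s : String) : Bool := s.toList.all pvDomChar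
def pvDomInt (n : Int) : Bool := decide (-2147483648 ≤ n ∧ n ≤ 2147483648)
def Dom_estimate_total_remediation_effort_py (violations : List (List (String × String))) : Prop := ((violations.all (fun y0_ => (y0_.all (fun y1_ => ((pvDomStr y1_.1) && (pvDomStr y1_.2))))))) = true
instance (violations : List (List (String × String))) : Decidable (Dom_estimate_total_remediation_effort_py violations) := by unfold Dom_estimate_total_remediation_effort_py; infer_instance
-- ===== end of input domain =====

-- B replaces A's three filtering comprehensions with a single pass summing weights from a severity->weight dict (simpler decomposition; same result).
-- ===== PORT A =====
def estimate_total_remediation_effort_py (violations : List (List (String × String))) : String :=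
  let critical_count : Int := ((violations.filter (fun v => (PySem.Dict.mk v).get? "severity" == some "critical")).length : Int)
  let high_count : Int := ((violations.filter (fun v => (PySem.Dict.mk v).get? "severity" == some "high")).length : Int)
  let medium_count : Int := ((violations.filter (fun v => (PySem.Dict.mk v).get? "severity" == some "medium")).length : Int)
  let total_effort_points : Int := critical_count * 8 + high_count * 5 + medium_count * 2
  if total_effort_points ≥ 40 then "very_high (6+ months)"
  else if total_effort_points ≥ 25 then "high (3-6 months)"
  else if total_effort_points ≥ 15 then "medium (1-3 months)"
  else "low (2-4 weeks)"

-- ===== PORT B =====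
def estimate_total_remediation_effort_py_alt (violations : List (List (String × String))) : String :=
  let weights : PySem.Dict String Int := PySem.Dict.ofList [("critical", 8), ("high", 5), ("medium", 2)]
  let total : Int := violations.foldl (fun acc v =>
    acc + (match (PySem.Dict.mk v).get? "severity" with
           | some s => weights.getD s 0
           | none => 0)) 0
  if total ≥ 40 then "very_high (6+ months)"
  else if total ≥ 25 then "high (3-6 months)"
  else if total ≥ 15 then "medium (1-3 months)"
  else "low (2-4 weeks)"

-- ===== PRECONDITION & SPEC =====
def Spec_estimate_total_remediation_effort_py (violations : List (List (String × String))) (out : String) : Prop := out = estimate_total_remediation_effort_py_alt violations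
instance (violations : List (List (String × String))) (out : String) : Decidable (Spec_estimate_total_remediation_effort_py violations out) := by unfold Spec_estimate_total_remediation_effort_py; infer_instance

-- ===== CLAIM (what is proved, stated in full; the proofs are below) =====
def Claim_equal_estimate_total_remediation_effort_py : Prop := ∀ (violations : List (List (String × String))), Dom_estimate_total_remediation_effort_py violations → Spec_estimate_total_remediation_effort_py violations (estimate_total_remediation_effort_py violations)

-- ===== LEMMAS AND PROOFS =====

-- ===== VERDICT (by name: the statement is the Claim_ definition above) =====
-- weight of one violation, as B's step computes it
def pvWeight (v : List (String × String)) : Int :=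
  match (PySem.Dict.mk v).get? "severity" with
  | some s => (PySem.Dict.ofList [("critical", (8:Int)), ("high", 5), ("medium", 2)]).getD s 0
  | none => 0

lemma pvWeight_eq (v : List (String × String)) :
    pvWeight v = (if (PySem.Dict.mk v).get? "severity" == some "critical" then (8:Int) else 0)
               + (if (PySem.Dict.mk v).get? "severity" == some "high" then (5:Int) else 0)
               + (if (PySem.Dict.mk v).get? "severity" == some "medium" then (2:Int) else 0) := by
  unfold pvWeight
  cases h : (PySem.Dict.mk v).get? "severity" with
  | none => simp
  | some s =>
    have hd : (PySem.Dict.ofList [("critical", (8:Int)), ("high", 5), ("medium", 2)])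
        = PySem.Dict.mk [("critical", 8), ("high", 5), ("medium", 2)] := rfl
    rw [hd]
    by_cases h1 : s = "critical"
    · simp [PySem.Dict.getD, PySem.Dict.get?, List.find?, h1]
    by_cases h2 : s = "high"
    · simp [PySem.Dict.getD, PySem.Dict.get?, List.find?, h1, h2, Ne.symm h1]
    by_cases h3 : s = "medium"
    · simp [PySem.Dict.getD, PySem.Dict.get?, List.find?, h1, h2, h3, Ne.symm h1, Ne.symm h2]
    · have e1 : ("critical" == s) = false := by simpa using Ne.symm h1
      have e2 : ("high" == s) = false := by simpa using Ne.symm h2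
      have e3 : ("medium" == s) = false := by simpa using Ne.symm h3
      simp [PySem.Dict.getD, PySem.Dict.get?, List.find?, e1, e2, e3, h1, h2, h3]

lemma foldl_pvWeight (vs : List (List (String × String))) (acc : Int) :
    vs.foldl (fun acc v =>
      acc + (match (PySem.Dict.mk v).get? "severity" with
             | some s => (PySem.Dict.ofList [("critical", (8:Int)), ("high", 5), ("medium", 2)]).getD s 0
             | none => 0)) acc
    = acc
      + ((vs.filter (fun v => (PySem.Dict.mk v).get? "severity" == some "critical")).length : Int) * 8
      + ((vs.filter (fun v => (PySem.Dict.mk v).get? "severity" == some "high")).length : Int) * 5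
      + ((vs.filter (fun v => (PySem.Dict.mk v).get? "severity" == some "medium")).length : Int) * 2 := by
  induction vs generalizing acc with
  | nil => simp
  | cons v vs ih =>
    simp only [List.foldl_cons, ih, List.filter_cons]
    have hw := pvWeight_eq v
    unfold pvWeight at hw
    rw [hw]
    split_ifs with h1 h2 h3 <;> simp_all <;> ring

theorem estimate_total_remediation_effort_py_spec : Claim_equal_estimate_total_remediation_effort_py := by
  intro violations _
  show estimate_total_remediation_effort_py violations = estimate_total_remediation_effort_py_alt violations
  simp only [estimate_total_remediation_effort_py, estimate_total_remediation_effort_py_alt,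
    foldl_pvWeight, zero_add]
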